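-- pv_equiv track=rewrite | github.com/spsurya007/Practice | new.py | makerope
-- ===== SOURCE A (Python) =====
-- def makerope(s):
--     le=[]
--     t=0
--     for i in s+'.':
--         if i=='.':
--             if t: le.append(t)
--             t=0
--         else:
--             t+=1
--     o0=[]
--     o1=[]
--     for i in le:
--         if i%2: o1.append(i)
--         else: o0.append(i)
--     o0.sort(reverse=True)
--     o1.sort(reverse=True)
--     for i in o1: o0.append(i)
--     out=".".join(map(lambda i:'-'*i,o0))
--     while len(out)<len(s): out+='.'
--     return out
-- ===== SOURCE B (Python) =====
-- def makerope(s):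
--     # Counting-sort approach: tally run lengths in a dict, then emit lengths by
--     # descending value within each parity class (evens first) - no comparison sort.
--     counts = {}
--     for p in s.split('.'):
--         if p:
--             counts[len(p)] = counts.get(len(p), 0) + 1
--     top = max(counts, default=0)
--     order = []
--     for parity in (0, 1):
--         for L in range(top, 0, -1):
--             if L % 2 == parity:
--                 order += [L] * counts.get(L, 0)
--     out = '.'.join('-' * L for L in order)
--     return out + '.' * (len(s) - len(out))
-- ===== Notes on version B (the rewrite author's own statement) =====
-- stated objective: alternative
-- what changed: B replaces A's manual run-counting loop, parity bucketing and two comparison sorts by a counting-sort strategy: it tallies run lengths in a dict via str.split, takes the maximum length, and emits each length count-many times scanning values downward within each parity class, so no comparison sort is performed; the padding while-loop becomes a closed-form dot-repeat.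
import Mathlib
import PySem

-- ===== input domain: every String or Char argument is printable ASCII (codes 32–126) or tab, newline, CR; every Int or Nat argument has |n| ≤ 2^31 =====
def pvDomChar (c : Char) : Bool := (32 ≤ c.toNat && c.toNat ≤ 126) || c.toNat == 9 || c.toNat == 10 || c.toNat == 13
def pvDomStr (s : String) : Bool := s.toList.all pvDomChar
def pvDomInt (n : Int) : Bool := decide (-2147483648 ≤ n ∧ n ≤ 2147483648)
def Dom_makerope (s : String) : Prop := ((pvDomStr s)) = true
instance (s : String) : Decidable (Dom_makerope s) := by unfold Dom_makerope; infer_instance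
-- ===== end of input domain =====

-- B replaces A's run-extraction loop, parity bucketing and two comparison sorts by a
-- counting approach: a dict tallying run lengths, then emitting lengths by descending
-- value within each parity class directly from the tally (objective: alternative).

-- ===== PORT A =====
-- the 'while len(out)<len(s): out+='.'' loop of A
def makeropePad (n : Nat) (out : List Char) : List Char :=
  if out.length < n then makeropePad n (out ++ ['.'])
  else out
termination_by n - out.length
decreasing_by simp only [List.length_append, List.length_cons, List.length_nil]; omega

def makerope (s : String) : String :=
  let p := (s.toList ++ ['.']).foldl
    (fun (st : List Int × Int) i =>
      if i = '.' then (if st.2 ≠ 0 then st.1 ++ [st.2] else st.1, 0)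
      else (st.1, st.2 + 1)) ([], 0)
  let buckets := p.1.foldl
    (fun (st : List Int × List Int) i =>
      if PySem.Int.mod i 2 ≠ 0 then (st.1, st.2 ++ [i]) else (st.1 ++ [i], st.2)) ([], [])
  let o0 := PySem.List.sorted buckets.1 (fun x => x) true
  let o1 := PySem.List.sorted buckets.2 (fun x => x) true
  let o := o1.foldl (fun acc i => acc ++ [i]) o0
  let out := PySem.Chars.join ['.'] (o.map (fun i => PySem.List.pyRepeat ['-'] i))
  String.mk (makeropePad s.toList.length out)

-- ===== PORT B =====
def makerope_alt (s : String) : String :=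
  let counts := (PySem.Chars.splitOn s.toList ['.']).foldl
    (fun (d : PySem.Dict Int Int) p =>
      if p ≠ [] then d.insert (p.length : Int) (d.getD (p.length : Int) 0 + 1) else d)
    PySem.Dict.empty
  let top := PySem.List.maxD counts.keys (fun x => x) 0   -- max(counts, default=0)
  let order := [(0 : Int), 1].foldl (fun acc parity =>
      (PySem.List.pyRange top 0 (-1)).foldl (fun acc2 L =>
        if PySem.Int.mod L 2 = parity then
          acc2 ++ List.replicate (counts.getD L 0).toNat L
        else acc2) acc) []
  let out := PySem.Chars.join ['.'] (order.map (fun L => PySem.List.pyRepeat ['-'] L))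
  String.mk (out ++ PySem.List.pyRepeat ['.'] ((s.toList.length : Int) - (out.length : Int)))

-- ===== PRECONDITION & SPEC =====
def Spec_makerope (s : String) (out : String) : Prop := out = makerope_alt s
instance (s : String) (out : String) : Decidable (Spec_makerope s out) := by unfold Spec_makerope; infer_instance

-- ===== CLAIM (what is proved, stated in full; the proofs are below) =====
def Claim_equal_makerope : Prop := ∀ (s : String), Dom_makerope s → Spec_makerope s (makerope s)

-- ===== LEMMAS AND PROOFS =====

-- run lengths of the maximal '.'-free blocks, with t pending characters already seen
def runsG : List Char → Int → List Int
  | [], t => if t ≠ 0 then [t] else []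
  | c :: r, t => if c = '.' then (if t ≠ 0 then [t] else []) ++ runsG r 0 else runsG r (t + 1)

-- reference shape of split('.'): pieces between dots, with reversed accumulator cur
def splitF : List Char → List Char → List (List Char)
  | [], cur => [cur.reverse]
  | c :: r, cur => if c = '.' then cur.reverse :: splitF r [] else splitF r (c :: cur)

theorem splitOn_go_eq (l : List Char) : ∀ (cur : List Char) (acc : List (List Char)) (fuel : Nat),
    l.length < fuel →
    PySem.Chars.splitOn.go ['.'] fuel l cur acc = acc.reverse ++ splitF l cur := by
  induction l with
  | nil =>
    intro cur acc fuel h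
    cases fuel with
    | zero => omega
    | succ m =>
      rw [PySem.Chars.splitOn.go]
      · simp [splitF]
      · simp
  | cons c r ih =>
    intro cur acc fuel h
    cases fuel with
    | zero => omega
    | succ m =>
      by_cases hc : c = '.'
      · subst hc
        rw [show PySem.Chars.splitOn.go ['.'] (m+1) ('.' :: r) cur acc
              = PySem.Chars.splitOn.go ['.'] m r [] (cur.reverse :: acc) by
            rw [PySem.Chars.splitOn.go]; simp [List.isPrefixOf]]
        rw [ih [] (cur.reverse :: acc) m (by simp at h; omega)]
        simp [splitF]
      · rw [show PySem.Chars.splitOn.go ['.'] (m+1) (c :: r) cur acc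
              = PySem.Chars.splitOn.go ['.'] m r (c :: cur) acc by
            rw [PySem.Chars.splitOn.go]
            simp only [List.isPrefixOf, Bool.and_eq_true, beq_iff_eq]
            simp
            intro h'
            exact absurd h'.symm hc]
        rw [ih (c :: cur) acc m (by simp at h; omega)]
        simp [splitF, hc]

theorem splitOn_eq (cs : List Char) :
    PySem.Chars.splitOn cs ['.'] = splitF cs [] := by
  unfold PySem.Chars.splitOn
  rw [splitOn_go_eq cs [] [] (cs.length + 1) (by omega)]
  simp

theorem splitF_lengths (cs : List Char) : ∀ cur : List Char,
    ((splitF cs cur).filter (fun p => p ≠ [])).map (fun p => (p.length : Int))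
      = runsG cs (cur.length : Int) := by
  induction cs with
  | nil =>
    intro cur
    by_cases h : cur = []
    · subst h; simp [splitF, runsG]
    · simp [splitF, runsG, h, List.length_eq_zero_iff]
  | cons c r ih =>
    intro cur
    by_cases hc : c = '.'
    · subst hc
      simp only [splitF, if_pos rfl]
      by_cases h : cur = []
      · subst h
        simpa [runsG] using ih []
      · have h2 : cur.reverse ≠ [] := by simpa using h
        have h3 : (cur.length : Int) ≠ 0 := by
          simpa [List.length_eq_zero_iff] using h
        simp only [runsG, if_pos h3]
        have h4 := ih []
        simp only [List.length_nil, Nat.cast_zero] at h4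
        simp only [ne_eq, decide_not] at h4
        simp [h2, h4]
    · simp only [splitF, runsG, if_neg hc]
      rw [ih (c :: cur)]
      have h5 : ((c :: cur).length : Int) = (cur.length : Int) + 1 := by
        simp only [List.length_cons]
        push_cast
        ring
      rw [h5]

theorem foldA (cs : List Char) : ∀ (le : List Int) (t : Int),
    (cs ++ ['.']).foldl
      (fun (st : List Int × Int) i =>
        if i = '.' then (if st.2 ≠ 0 then st.1 ++ [st.2] else st.1, 0)
        else (st.1, st.2 + 1)) (le, t)
      = (le ++ runsG cs t, 0) := by
  induction cs with
  | nil =>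
    intro le t
    by_cases h : t ≠ 0 <;> simp [runsG, h]
  | cons c r ih =>
    intro le t
    simp only [List.cons_append, List.foldl_cons]
    by_cases hc : c = '.'
    · subst hc
      rw [if_pos rfl, ih]
      by_cases h : t ≠ 0 <;> simp [h, runsG, List.append_assoc]
    · rw [if_neg hc, ih]
      simp [runsG, hc]

theorem bucketEq (l : List Int) : ∀ (a b : List Int),
    l.foldl (fun (st : List Int × List Int) i =>
        if PySem.Int.mod i 2 ≠ 0 then (st.1, st.2 ++ [i]) else (st.1 ++ [i], st.2)) (a, b)
      = (a ++ l.filter (fun i => !decide (PySem.Int.mod i 2 ≠ 0)),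
         b ++ l.filter (fun i => decide (PySem.Int.mod i 2 ≠ 0))) := by
  induction l with
  | nil => simp
  | cons i l ih =>
    intro a b
    simp only [List.foldl_cons]
    have hm : PySem.Int.mod i 2 = i % 2 := by show Int.fmod i 2 = i % 2; rw [Int.fmod_eq_emod]; norm_num
    by_cases h : PySem.Int.mod i 2 ≠ 0
    · rw [if_pos h, ih]
      rw [hm] at h
      simp [List.filter_cons, List.append_assoc]
      omega
    · rw [if_neg h, ih]
      rw [hm] at h
      simp [List.filter_cons, List.append_assoc]
      omega

-- B's dict-building loop over the split pieces is the counter of the run-length list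
theorem countsFold (pieces : List (List Char)) : ∀ (d : PySem.Dict Int Int),
    pieces.foldl
      (fun (d : PySem.Dict Int Int) p =>
        if p ≠ [] then d.insert (p.length : Int) (d.getD (p.length : Int) 0 + 1) else d) d
      = ((pieces.filter (fun p => p ≠ [])).map (fun p => (p.length : Int))).foldl
          (fun d L => d.insert L (d.getD L 0 + 1)) d := by
  induction pieces with
  | nil => intro d; simp
  | cons p r ih =>
    intro d
    by_cases h : p = []
    · rw [List.foldl_cons, if_neg (by simp [h]), List.filter_cons_of_neg (by simp [h]), ih]
    · rw [List.foldl_cons, if_pos (by simp [h]), List.filter_cons_of_pos (by simp [h]),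
        List.map_cons, List.foldl_cons, ih]

-- every element of a block of 'g L' below equals L
theorem pairwise_flatMap_ge (g : Int → List Int) (hg : ∀ L x, x ∈ g L → x = L) :
    ∀ l : List Int, l.Pairwise (fun a b => b < a) →
    (l.flatMap g).Pairwise (fun a b : Int => b ≤ a) := by
  intro l
  induction l with
  | nil => intro _; simp
  | cons c r ih =>
    intro h
    rw [List.pairwise_cons] at h
    rw [List.flatMap_cons, List.pairwise_append]
    refine ⟨?_, ih h.2, ?_⟩
    · exact List.pairwise_of_forall_mem_list
        (fun a ha b hb => by rw [hg c a ha, hg c b hb])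
    · intro a ha b hb
      rw [List.mem_flatMap] at hb
      obtain ⟨L, hL, hbL⟩ := hb
      rw [hg c a ha, hg L b hbL]
      exact le_of_lt (h.1 L hL)

theorem sum_count_single (v : Int) (g : Int → List Int) (hg : ∀ L x, x ∈ g L → x = L) :
    ∀ l : List Int, l.Nodup →
    (l.map (fun L => List.count v (g L))).sum = if v ∈ l then List.count v (g v) else 0 := by
  have hz : ∀ L, L ≠ v → List.count v (g L) = 0 := by
    intro L hLv
    exact List.count_eq_zero.mpr (fun h => hLv ((hg L v h) ▸ rfl))
  intro l
  induction l with
  | nil => intro _; simp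
  | cons c r ih =>
    intro hnd
    rw [List.nodup_cons] at hnd
    simp only [List.map_cons, List.sum_cons, ih hnd.2, List.mem_cons]
    by_cases hc : v = c
    · subst hc
      simp [hnd.1]
    · rw [hz c (fun h => hc h.symm)]
      simp [hc]

-- counting sort: emitting each length count-many times, scanning values downwards,
-- is exactly Python's sorted(…, reverse=True)
theorem csort (xs : List Int) (top : Int) (pr : Int → Prop) [DecidablePred pr]
    (hb : ∀ x ∈ xs, 1 ≤ x ∧ x ≤ top) :
    (PySem.List.pyRange top 0 (-1)).flatMap
      (fun L => if pr L then List.replicate (xs.count L) L else [])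
    = PySem.List.sorted (xs.filter (fun x => decide (pr x))) (fun x => x) true := by
  set g : Int → List Int := fun L => if pr L then List.replicate (xs.count L) L else [] with hgdef
  have hg : ∀ L x, x ∈ g L → x = L := by
    intro L x hx
    simp only [hgdef] at hx
    split at hx
    · exact List.eq_of_mem_replicate hx
    · simp at hx
  refine List.Perm.eq_of_pairwise (le := fun a b : Int => b ≤ a)
    (fun a b _ _ h1 h2 => le_antisymm h2 h1) ?_ ?_ ?_
  · refine pairwise_flatMap_ge g hg _ ?_
    rw [PySem.List.pyRange_neg_one_eq_reverse]
    exact List.pairwise_reverse.mpr (PySem.List.pairwise_lt_pyRange_one _ _)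
  · exact PySem.List.sorted_pairwise_rev _ _
  · refine List.Perm.trans (List.perm_iff_count.mpr ?_)
      (PySem.List.sorted_perm (xs.filter (fun x => decide (pr x))) (fun x => x) true).symm
    intro v
    have hnd : (PySem.List.pyRange top 0 (-1)).Nodup := by
      rw [PySem.List.pyRange_neg_one_eq_reverse]
      exact List.nodup_reverse.mpr (PySem.List.nodup_pyRange_one _ _)
    rw [List.count_flatMap]
    simp only [Function.comp_def]
    rw [sum_count_single v g hg _ hnd]
    by_cases hv : v ∈ PySem.List.pyRange top 0 (-1)
    · rw [if_pos hv]
      simp only [hgdef]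
      by_cases hp : pr v
      · rw [if_pos hp, List.count_replicate, if_pos (by simp),
          List.count_filter (by simpa using hp)]
      · rw [if_neg hp]
        simp only [List.count_nil]
        refine (List.count_eq_zero.mpr (fun h => hp ?_)).symm
        simpa using List.of_mem_filter h
    · rw [if_neg hv]
      have hvx : v ∉ xs := by
        intro h
        exact hv (PySem.List.mem_pyRange_neg_one.mpr ⟨by have := (hb v h).1; omega, (hb v h).2⟩)
      exact (List.count_eq_zero.mpr (fun h => hvx (List.mem_of_mem_filter h))).symm

-- an 'acc ++ block-if' loop body in flatMap form
theorem foldl_append_block (c : Int → Prop) [DecidablePred c] (r : Int → List Int) (l : List Int) (acc : List Int) :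
    l.foldl (fun acc2 L => if c L then acc2 ++ r L else acc2) acc
      = acc ++ l.flatMap (fun L => if c L then r L else []) := by
  have h : (fun (acc2 : List Int) L => if c L then acc2 ++ r L else acc2)
      = fun acc2 L => acc2 ++ (if c L then r L else []) := by
    funext acc2 L
    split <;> simp
  rw [h, PySem.List.foldl_append_eq_flatMap]

theorem makeropePad_eq (n : Nat) (out : List Char) :
    makeropePad n out = out ++ List.replicate (n - out.length) '.' := by
  suffices H : ∀ (k : Nat) (out : List Char), n - out.length = k →
      makeropePad n out = out ++ List.replicate (n - out.length) '.' from H _ out rfl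
  intro k
  induction k with
  | zero =>
    intro out h
    have hn : ¬ out.length < n := by omega
    rw [makeropePad, if_neg hn, h]
    simp
  | succ k ih =>
    intro out h
    have hlt : out.length < n := by omega
    rw [makeropePad, if_pos hlt,
      ih (out ++ ['.']) (by simp only [List.length_append, List.length_cons, List.length_nil]; omega)]
    have h1 : n - out.length = (n - (out ++ ['.']).length) + 1 := by
      simp only [List.length_append, List.length_cons, List.length_nil]; omega
    rw [h1, List.replicate_succ]
    simp

-- ===== VERDICT (by name: the statement is the Claim_ definition above) =====
theorem makerope_spec : Claim_equal_makerope := by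
  intro s _
  show makerope s = makerope_alt s
  unfold makerope makerope_alt
  set xs : List Int :=
    ((PySem.Chars.splitOn s.toList ['.']).filter (fun p => p ≠ [])).map
      (fun p => (p.length : Int)) with hxs
  have hruns : runsG s.toList 0 = xs := by
    rw [hxs, splitOn_eq]
    have h := splitF_lengths s.toList []
    simp only [List.length_nil, Nat.cast_zero] at h
    rw [h]
  -- A side
  rw [foldA s.toList [] 0]
  simp only [List.nil_append, hruns]
  rw [bucketEq xs [] []]
  simp only [List.nil_append]
  rw [PySem.List.foldl_append_singleton_eq_self]
  -- B side: the dict is the counter of xs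
  rw [countsFold, ← hxs, PySem.Dict.foldl_insert_getD_add_one_eq_counter]
  set top : Int := PySem.List.maxD (PySem.Dict.counter xs).keys (fun x => x) 0 with htop
  have hb : ∀ x ∈ xs, 1 ≤ x ∧ x ≤ top := by
    intro x hx
    constructor
    · rw [hxs] at hx
      simp only [List.mem_map, List.mem_filter] at hx
      obtain ⟨p, ⟨_, hp⟩, rfl⟩ := hx
      have : p ≠ [] := by simpa using hp
      have : 0 < p.length := List.length_pos_iff.mpr this
      omega
    · refine PySem.List.le_maxD_id _ 0 x ?_
      rw [PySem.Dict.keys_counter, PySem.Set.mem_ofList]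
      exact hx
  simp only [List.foldl_cons, List.foldl_nil, PySem.Dict.getD_counter, Int.toNat_natCast]
  rw [foldl_append_block, foldl_append_block]
  simp only [List.nil_append]
  rw [csort xs top _ hb, csort xs top _ hb]
  -- align the parity filters
  have hf0 : xs.filter (fun L => decide (PySem.Int.mod L 2 = 0))
      = xs.filter (fun i => !decide (PySem.Int.mod i 2 ≠ 0)) := by
    apply List.filter_congr
    intro x _
    have h2 : x % 2 = 0 ∨ x % 2 = 1 := by omega
    rcases h2 with h | h <;> simp [h]
  have hf1 : xs.filter (fun L => decide (PySem.Int.mod L 2 = 1))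
      = xs.filter (fun i => decide (PySem.Int.mod i 2 ≠ 0)) := by
    apply List.filter_congr
    intro x _
    have h2 : x % 2 = 0 ∨ x % 2 = 1 := by omega
    rcases h2 with h | h <;> simp [h]
  rw [hf0, hf1]
  -- the padding
  rw [makeropePad_eq]
  congr 1
  rw [PySem.List.pyRepeat_singleton]
  have hnm : ∀ (n m : Nat), ((n : Int) - (m : Int)).toNat = n - m := fun n m => by omega
  rw [hnm]
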